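-- pv_equiv track=rewrite | github.com/greenlemonT/algorithm | 프로그래머스/1/12930. 이상한 문자 만들기/이상한 문자 만들기.py | solution
-- ===== SOURCE A (Python) =====
-- def solution(s):
--     answer = []
--     index=0
--     for char in s:
--         if char == ' ':
--             answer.append(char)
--             index=0
--         else:
--             if index % 2 == 0:
--                 answer.append(char.upper())
--                 index += 1
--             else:
--                 answer.append(char.lower())
--                 index += 1
--
--     return ''.join(answer)
-- ===== SOURCE B (Python) =====
-- def solution(s):
--     return ' '.join(
--         ''.join(c.upper() if i % 2 == 0 else c.lower() for i, c in enumerate(w))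
--         for w in s.split(' ')
--     )
-- ===== Notes on version B (the rewrite author's own statement) =====
-- stated objective: idiomatic
-- what changed: Replaces the single stateful scan with a manual index counter reset on spaces by a word-level decomposition: single-space split, per-word enumerate with even/odd casing, single-space join
import Mathlib
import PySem

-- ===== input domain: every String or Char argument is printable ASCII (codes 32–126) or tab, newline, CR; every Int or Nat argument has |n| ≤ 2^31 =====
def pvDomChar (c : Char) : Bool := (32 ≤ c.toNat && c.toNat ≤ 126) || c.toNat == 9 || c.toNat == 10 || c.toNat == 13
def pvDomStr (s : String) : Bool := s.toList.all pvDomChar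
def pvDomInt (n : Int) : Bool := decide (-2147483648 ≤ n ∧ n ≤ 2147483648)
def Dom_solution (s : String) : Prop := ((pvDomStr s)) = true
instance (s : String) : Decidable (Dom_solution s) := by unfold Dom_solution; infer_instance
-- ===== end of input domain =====

-- B replaces A's single stateful scan (manual index counter reset on spaces) by a word-level
-- decomposition: split on the space character, per-word enumerate with even/odd casing, rejoin.

-- ===== PORT A =====
-- literal transliteration of A: one fold over the characters carrying (answer, index)
def solution (s : String) : String :=
  String.mk
    (s.toList.foldl
      (fun (st : List Char × Nat) (char : Char) =>
        if char = ' ' then (st.1 ++ [char], 0)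
        else if st.2 % 2 = 0 then (st.1 ++ [PySem.Chars.upperChar char], st.2 + 1)
        else (st.1 ++ [PySem.Chars.lowerChar char], st.2 + 1))
      ([], 0)).1

-- ===== PORT B =====
-- literal transliteration of B: s.split(' ') → per-word map over enumerate → ' '.join
def solution_alt (s : String) : String :=
  String.mk (PySem.Chars.join [' ']
    ((List.splitOnP (· == ' ') s.toList).map
      (fun w => (PySem.List.enumerate w).map
        (fun p => if p.1 % 2 == 0 then PySem.Chars.upperChar p.2
                  else PySem.Chars.lowerChar p.2))))

-- ===== PRECONDITION & SPEC =====
def Spec_solution (s : String) (out : String) : Prop := out = solution_alt s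
instance (s : String) (out : String) : Decidable (Spec_solution s out) := by unfold Spec_solution; infer_instance

-- ===== CLAIM (what is proved, stated in full; the proofs are below) =====
def Claim_equal_solution : Prop := ∀ (s : String), Dom_solution s → Spec_solution s (solution s)

-- ===== LEMMAS AND PROOFS =====

def pvF (i : Nat) (c : Char) : Char :=
  if i % 2 = 0 then PySem.Chars.upperChar c else PySem.Chars.lowerChar c

-- direct recursive characterisation of A's scan
def pvProcA : List Char → Nat → List Char
  | [], _ => []
  | c :: cs, i =>
    if c = ' ' then ' ' :: pvProcA cs 0 else pvF i c :: pvProcA cs (i + 1)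

-- per-word transform starting at index i
def pvProcW : Nat → List Char → List Char
  | _, [] => []
  | i, c :: cs => pvF i c :: pvProcW (i + 1) cs

def pvTail (ws : List (List Char)) : List Char :=
  (ws.map (fun w => ' ' :: pvProcW 0 w)).flatten

def pvJoin : List (List Char) → Nat → List Char
  | [], _ => []
  | w :: ws, i => pvProcW i w ++ pvTail ws

lemma pv_fold_eq (l : List Char) : ∀ (acc : List Char) (i : Nat),
    (l.foldl
      (fun (st : List Char × Nat) (char : Char) =>
        if char = ' ' then (st.1 ++ [char], 0)
        else if st.2 % 2 = 0 then (st.1 ++ [PySem.Chars.upperChar char], st.2 + 1)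
        else (st.1 ++ [PySem.Chars.lowerChar char], st.2 + 1))
      (acc, i)).1 = acc ++ pvProcA l i := by
  induction l with
  | nil => intro acc i; simp [pvProcA]
  | cons c cs ih =>
    intro acc i
    by_cases hc : c = ' '
    · simp [List.foldl_cons, hc, pvProcA, ih]
    · by_cases hi : i % 2 = 0 <;>
        simp [List.foldl_cons, hc, hi, pvProcA, pvF, ih]

lemma pv_procA_eq_join (l : List Char) : ∀ (i : Nat),
    pvProcA l i = pvJoin (List.splitOnP (· == ' ') l) i := by
  induction l with
  | nil => intro i; simp [List.splitOnP_nil, pvJoin, pvProcW, pvTail, pvProcA]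
  | cons c cs ih =>
    intro i
    rcases h : List.splitOnP (· == ' ') cs with _ | ⟨w, ws⟩
    · exact absurd h (List.splitOnP_ne_nil _ cs)
    · by_cases hc : c = ' '
      · simp [pvProcA, hc, List.splitOnP_cons, ih, h, pvJoin, pvProcW, pvTail]
      · simp [pvProcA, hc, List.splitOnP_cons, ih, h, pvJoin, pvProcW]

lemma pv_enum_eq_procW (w : List Char) : ∀ (k : Nat),
    (PySem.List.enumerate w (k : Int)).map
      (fun p => if p.1 % 2 == 0 then PySem.Chars.upperChar p.2
                else PySem.Chars.lowerChar p.2) = pvProcW k w := by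
  induction w with
  | nil => intro k; simp [PySem.List.enumerate_nil, pvProcW]
  | cons c cs ih =>
    intro k
    have hk : ((k : Int) % 2 == 0) = (k % 2 = 0 : Bool) := by
      rcases Nat.mod_two_eq_zero_or_one k with h | h <;>
        · simp [show ((k : Int) % 2) = ((k % 2 : Nat) : Int) by push_cast; ring, h]
    have hcast : ((k : Int) + 1) = ((k + 1 : Nat) : Int) := by push_cast; ring
    simp only [PySem.List.enumerate_cons, List.map_cons, hcast, ih, pvProcW, pvF, hk]
    by_cases h : k % 2 = 0 <;> simp [h]

lemma pv_join_tail (w : List Char) (ws : List (List Char)) :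
    PySem.Chars.join [' '] (w :: ws.map (pvProcW 0)) = w ++ pvTail ws := by
  induction ws generalizing w with
  | nil => simp [pvTail, PySem.Chars.join_singleton]
  | cons w2 ws' ih =>
    simp only [List.map_cons, PySem.Chars.join_cons_cons, ih, pvTail, List.map_cons,
      List.flatten_cons]
    simp [List.append_assoc]

lemma pv_join_eq (S : List (List Char)) :
    pvJoin S 0 = PySem.Chars.join [' '] (S.map (pvProcW 0)) := by
  cases S with
  | nil => simp [pvJoin, PySem.Chars.join_nil]
  | cons w ws => rw [List.map_cons, pv_join_tail]; rfl

-- ===== VERDICT (by name: the statement is the Claim_ definition above) =====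
theorem solution_spec : Claim_equal_solution := by
  intro s _
  show solution s = solution_alt s
  unfold solution solution_alt
  rw [pv_fold_eq, List.nil_append, pv_procA_eq_join, pv_join_eq]
  congr 2
  exact (List.map_congr_left (fun w _ => by simpa using (pv_enum_eq_procW w 0).symm))
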